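-- pv_equiv track=rewrite | github.com/ConnectedReasoning/FormaComposition | forma/intervals/music/bass.py | scale_neighbors
-- ===== SOURCE A (Python) =====
-- def scale_neighbors(note: int, scale_tones: list[int], direction: int = 0) -> list[int]:
--     """Scale tones adjacent to note (within 4 semitones)."""
--     neighbors = []
--     for s in scale_tones:
--         dist = s - note
--         if dist == 0:
--             continue
--         if abs(dist) > 4:
--             continue
--         if direction > 0 and dist < 0:
--             continue
--         if direction < 0 and dist > 0:
--             continue
--         neighbors.append(s)
--     return sorted(neighbors, key=lambda s: abs(s - note))
-- ===== SOURCE B (Python) =====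
-- def scale_neighbors(note: int, scale_tones: list[int], direction: int = 0) -> list[int]:
--     """Scale tones adjacent to note (within 4 semitones), bucketed by distance: no sort."""
--     out = []
--     for d in (1, 2, 3, 4):
--         out += [s for s in scale_tones
--                 if abs(s - note) == d
--                 and not (direction > 0 and s - note < 0)
--                 and not (direction < 0 and s - note > 0)]
--     return out
-- ===== Notes on version B (the rewrite author's own statement) =====
-- stated objective: alternative
-- what changed: Replaces filter-then-stable-sort-by-distance with four distance buckets (d = 1..4) emitted in order, each filled by a scan of scale_tones in input order, which reproduces the stable sort's tie order without sorting.
import Mathlib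
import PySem

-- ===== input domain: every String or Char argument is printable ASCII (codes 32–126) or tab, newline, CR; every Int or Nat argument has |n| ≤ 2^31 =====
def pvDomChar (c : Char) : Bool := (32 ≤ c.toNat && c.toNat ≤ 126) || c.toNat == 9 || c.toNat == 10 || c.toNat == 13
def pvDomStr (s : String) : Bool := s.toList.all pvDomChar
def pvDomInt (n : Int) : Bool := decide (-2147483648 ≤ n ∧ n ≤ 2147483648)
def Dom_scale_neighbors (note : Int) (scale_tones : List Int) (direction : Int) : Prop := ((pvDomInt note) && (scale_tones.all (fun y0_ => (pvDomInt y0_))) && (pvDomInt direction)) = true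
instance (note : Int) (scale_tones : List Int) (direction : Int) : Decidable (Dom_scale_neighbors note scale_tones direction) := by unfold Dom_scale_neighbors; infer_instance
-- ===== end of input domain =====

-- B replaces A's filter-then-stable-sort with four distance buckets (d = 1..4) emitted in
-- order, each filled by a scan of scale_tones in input order — same output, no sort.

-- ===== PORT A =====
-- literal transliteration of A: accumulate neighbors, then stable sort by |s - note|
def scale_neighbors (note : Int) (scale_tones : List Int) (direction : Int) : List Int :=
  let neighbors := scale_tones.foldl (fun acc s =>
    let dist := s - note
    if dist = 0 then acc
    else if |dist| > 4 then acc
    else if direction > 0 ∧ dist < 0 then acc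
    else if direction < 0 ∧ dist > 0 then acc
    else acc ++ [s]) []
  PySem.List.sorted neighbors (fun s => |s - note|) false

-- ===== PORT B =====
-- literal transliteration of B: for d in (1,2,3,4), append the comprehension (filter) for d
def scale_neighbors_alt (note : Int) (scale_tones : List Int) (direction : Int) : List Int :=
  ([1, 2, 3, 4] : List Int).foldl (fun out d =>
    out ++ scale_tones.filter (fun s =>
      decide (|s - note| = d ∧ ¬(direction > 0 ∧ s - note < 0) ∧ ¬(direction < 0 ∧ s - note > 0)))) []

-- ===== PRECONDITION & SPEC =====
def Spec_scale_neighbors (note : Int) (scale_tones : List Int) (direction : Int) (out : List Int) : Prop := out = scale_neighbors_alt note scale_tones direction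
instance (note : Int) (scale_tones : List Int) (direction : Int) (out : List Int) : Decidable (Spec_scale_neighbors note scale_tones direction out) := by unfold Spec_scale_neighbors; infer_instance

-- ===== CLAIM (what is proved, stated in full; the proofs are below) =====
def Claim_equal_scale_neighbors : Prop := ∀ (note : Int) (scale_tones : List Int) (direction : Int), Dom_scale_neighbors note scale_tones direction → Spec_scale_neighbors note scale_tones direction (scale_neighbors note scale_tones direction)

-- ===== LEMMAS AND PROOFS =====

-- insertBy drops into the seam: past everything it is not before, in front of everything it is before
theorem insertBy_middle (bef : Int → Int → Bool) (x : Int) (as bs : List Int)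
    (ha : ∀ y ∈ as, bef x y = false) (hb : ∀ y ∈ bs, bef x y = true) :
    PySem.List.insertBy bef x (as ++ bs) = as ++ x :: bs := by
  induction as with
  | nil =>
    cases bs with
    | nil => simp [PySem.List.insertBy]
    | cons b bs => simp [PySem.List.insertBy, hb b (by simp)]
  | cons a as ih =>
    simp only [List.cons_append, PySem.List.insertBy, ha a (by simp), Bool.false_eq_true,
      if_false]
    simpa using ih (fun y hy => ha y (by simp [hy]))

-- invariant of the insertion-sort fold: buckets by key value 1..4 stay buckets
theorem foldl_insertBy_buckets (k : Int → Int) (xs : List Int) :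
    ∀ (b1 b2 b3 b4 : List Int),
    (∀ x ∈ xs, k x = 1 ∨ k x = 2 ∨ k x = 3 ∨ k x = 4) →
    (∀ y ∈ b1, k y = 1) → (∀ y ∈ b2, k y = 2) → (∀ y ∈ b3, k y = 3) → (∀ y ∈ b4, k y = 4) →
    xs.foldl (fun acc x => PySem.List.insertBy (fun a b => decide (k a < k b)) x acc)
        (b1 ++ b2 ++ b3 ++ b4)
      = (b1 ++ xs.filter (fun x => decide (k x = 1))) ++ (b2 ++ xs.filter (fun x => decide (k x = 2)))
        ++ (b3 ++ xs.filter (fun x => decide (k x = 3))) ++ (b4 ++ xs.filter (fun x => decide (k x = 4))) := by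
  induction xs with
  | nil => intro b1 b2 b3 b4 _ _ _ _ _; simp
  | cons x xs ih =>
    intro b1 b2 b3 b4 hk h1 h2 h3 h4
    have hx := hk x (by simp)
    have hk' : ∀ y ∈ xs, k y = 1 ∨ k y = 2 ∨ k y = 3 ∨ k y = 4 := fun y hy => hk y (by simp [hy])
    rcases hx with hx | hx | hx | hx
    · have hins : PySem.List.insertBy (fun a b => decide (k a < k b)) x (b1 ++ b2 ++ b3 ++ b4)
          = b1 ++ x :: (b2 ++ b3 ++ b4) := by
        have := insertBy_middle (fun a b => decide (k a < k b)) x b1 (b2 ++ b3 ++ b4)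
          (fun y hy => by have := h1 y hy; simp; omega)
          (fun y hy => by
            simp only [List.mem_append] at hy
            rcases hy with (hy | hy) | hy
            · have := h2 y hy; simp; omega
            · have := h3 y hy; simp; omega
            · have := h4 y hy; simp; omega)
        simpa [List.append_assoc] using this
      have := ih (b1 ++ [x]) b2 b3 b4 hk'
        (fun y hy => by rcases List.mem_append.mp hy with hy | hy; exacts [h1 y hy, (List.mem_singleton.mp hy) ▸ hx])
        h2 h3 h4
      simp only [List.foldl_cons, hins]
      rw [show b1 ++ x :: (b2 ++ b3 ++ b4) = (b1 ++ [x]) ++ b2 ++ b3 ++ b4 by simp]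
      rw [this]
      simp [hx, List.append_assoc]
    · have hins : PySem.List.insertBy (fun a b => decide (k a < k b)) x (b1 ++ b2 ++ b3 ++ b4)
          = (b1 ++ b2) ++ x :: (b3 ++ b4) := by
        have := insertBy_middle (fun a b => decide (k a < k b)) x (b1 ++ b2) (b3 ++ b4)
          (fun y hy => by
            simp only [List.mem_append] at hy
            rcases hy with hy | hy
            · have := h1 y hy; simp; omega
            · have := h2 y hy; simp; omega)
          (fun y hy => by
            simp only [List.mem_append] at hy
            rcases hy with hy | hy
            · have := h3 y hy; simp; omega
            · have := h4 y hy; simp; omega)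
        simpa [List.append_assoc] using this
      have := ih b1 (b2 ++ [x]) b3 b4 hk' h1
        (fun y hy => by rcases List.mem_append.mp hy with hy | hy; exacts [h2 y hy, (List.mem_singleton.mp hy) ▸ hx])
        h3 h4
      simp only [List.foldl_cons, hins]
      rw [show (b1 ++ b2) ++ x :: (b3 ++ b4) = b1 ++ (b2 ++ [x]) ++ b3 ++ b4 by simp]
      rw [this]
      simp [hx, List.append_assoc]
    · have hins : PySem.List.insertBy (fun a b => decide (k a < k b)) x (b1 ++ b2 ++ b3 ++ b4)
          = (b1 ++ b2 ++ b3) ++ x :: b4 := by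
        have := insertBy_middle (fun a b => decide (k a < k b)) x (b1 ++ b2 ++ b3) b4
          (fun y hy => by
            simp only [List.mem_append] at hy
            rcases hy with (hy | hy) | hy
            · have := h1 y hy; simp; omega
            · have := h2 y hy; simp; omega
            · have := h3 y hy; simp; omega)
          (fun y hy => by have := h4 y hy; simp; omega)
        simpa [List.append_assoc] using this
      have := ih b1 b2 (b3 ++ [x]) b4 hk' h1 h2
        (fun y hy => by rcases List.mem_append.mp hy with hy | hy; exacts [h3 y hy, (List.mem_singleton.mp hy) ▸ hx])
        h4
      simp only [List.foldl_cons, hins]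
      rw [show (b1 ++ b2 ++ b3) ++ x :: b4 = b1 ++ b2 ++ (b3 ++ [x]) ++ b4 by simp]
      rw [this]
      simp [hx, List.append_assoc]
    · have hins : PySem.List.insertBy (fun a b => decide (k a < k b)) x (b1 ++ b2 ++ b3 ++ b4)
          = (b1 ++ b2 ++ b3 ++ b4) ++ x :: ([] : List Int) := by
        have := insertBy_middle (fun a b => decide (k a < k b)) x (b1 ++ b2 ++ b3 ++ b4) []
          (fun y hy => by
            simp only [List.mem_append] at hy
            rcases hy with ((hy | hy) | hy) | hy
            · have := h1 y hy; simp; omega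
            · have := h2 y hy; simp; omega
            · have := h3 y hy; simp; omega
            · have := h4 y hy; simp; omega)
          (by simp)
        simpa using this
      have := ih b1 b2 b3 (b4 ++ [x]) hk' h1 h2 h3
        (fun y hy => by rcases List.mem_append.mp hy with hy | hy; exacts [h4 y hy, (List.mem_singleton.mp hy) ▸ hx])
      simp only [List.foldl_cons, hins]
      rw [show (b1 ++ b2 ++ b3 ++ b4) ++ x :: ([] : List Int) = b1 ++ b2 ++ b3 ++ (b4 ++ [x]) by simp]
      rw [this]
      simp [hx, List.append_assoc]

-- stable sort of a list whose keys all lie in {1,2,3,4} is the concatenation of its key buckets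
theorem sorted_eq_buckets (k : Int → Int) (xs : List Int)
    (hk : ∀ x ∈ xs, k x = 1 ∨ k x = 2 ∨ k x = 3 ∨ k x = 4) :
    PySem.List.sorted xs k false
      = xs.filter (fun x => decide (k x = 1)) ++ xs.filter (fun x => decide (k x = 2))
        ++ xs.filter (fun x => decide (k x = 3)) ++ xs.filter (fun x => decide (k x = 4)) := by
  rw [PySem.List.sorted_eq_foldl_insertBy]
  have := foldl_insertBy_buckets k xs [] [] [] [] hk (by simp) (by simp) (by simp) (by simp)
  simpa [List.append_assoc] using this

-- A's accumulation loop is a filter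
theorem foldA_eq_filter (note direction : Int) (xs : List Int) : ∀ (acc : List Int),
    xs.foldl (fun acc s =>
      let dist := s - note
      if dist = 0 then acc
      else if |dist| > 4 then acc
      else if direction > 0 ∧ dist < 0 then acc
      else if direction < 0 ∧ dist > 0 then acc
      else acc ++ [s]) acc
    = acc ++ xs.filter (fun s => decide (¬ s - note = 0 ∧ ¬ |s - note| > 4 ∧
        ¬(direction > 0 ∧ s - note < 0) ∧ ¬(direction < 0 ∧ s - note > 0))) := by
  induction xs with
  | nil => intro acc; simp
  | cons x xs ih =>
    intro acc
    simp only [List.foldl_cons, List.filter_cons]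
    by_cases h1 : x - note = 0
    · rw [if_pos h1, ih, if_neg (by simp [h1])]
    · rw [if_neg h1]
      by_cases h2 : |x - note| > 4
      · rw [if_pos h2, ih, if_neg (by simp [h1, h2])]
      · rw [if_neg h2]
        by_cases h3 : direction > 0 ∧ x - note < 0
        · rw [if_pos h3, ih, if_neg (by simp [h1, h2, h3])]
        · rw [if_neg h3]
          by_cases h4 : direction < 0 ∧ x - note > 0
          · rw [if_pos h4, ih, if_neg (by simp; omega)]
          · rw [if_neg h4, ih, if_pos (by simp; omega)]
            simp

-- ===== VERDICT (by name: the statement is the Claim_ definition above) =====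
theorem scale_neighbors_spec : Claim_equal_scale_neighbors := by
  intro note scale_tones direction _
  unfold Spec_scale_neighbors scale_neighbors scale_neighbors_alt
  simp only [foldA_eq_filter note direction scale_tones [], List.nil_append]
  set p : Int → Bool := fun s => decide (¬ s - note = 0 ∧ ¬ |s - note| > 4 ∧
      ¬(direction > 0 ∧ s - note < 0) ∧ ¬(direction < 0 ∧ s - note > 0)) with hp
  have hk : ∀ x ∈ scale_tones.filter p, |x - note| = 1 ∨ |x - note| = 2 ∨ |x - note| = 3 ∨ |x - note| = 4 := by
    intro x hx
    have := List.of_mem_filter hx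
    rw [hp] at this; simp at this
    rcases abs_cases (x - note) with ⟨he, h0⟩ | ⟨he, h0⟩ <;> rw [he] <;> omega
  rw [sorted_eq_buckets (fun s => |s - note|) _ hk]
  simp only [List.foldl_cons, List.foldl_nil, List.nil_append]
  have hq : ∀ d : Int, (1 ≤ d ∧ d ≤ 4) →
      (scale_tones.filter p).filter (fun x => decide (|x - note| = d))
      = scale_tones.filter (fun s =>
          decide (|s - note| = d ∧ ¬(direction > 0 ∧ s - note < 0) ∧ ¬(direction < 0 ∧ s - note > 0))) := by
    intro d hd
    rw [List.filter_filter]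
    apply List.filter_congr
    intro x _
    rw [hp]
    rw [Bool.eq_iff_iff]
    simp only [Bool.and_eq_true, decide_eq_true_eq]
    rcases abs_cases (x - note) with ⟨he, h0⟩ | ⟨he, h0⟩ <;> rw [he] <;> omega
  rw [hq 1 (by omega), hq 2 (by omega), hq 3 (by omega), hq 4 (by omega)]
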